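-- pv_equiv track=rewrite | github.com/aj-geddes/revitpy | proof-of-concepts/computer-vision-progress/src/progress_monitor.py | _analyze_phases_timeline
-- ===== SOURCE A (Python) =====
-- from typing import Dict, List, Any, Tuple, Optional
--
-- def _analyze_phases_timeline(photo_metadata: List[Dict], detection_results: List[Dict]) -> Dict[str, Any]:
--     """Analyze timeline progression through construction phases."""
--     phases_over_time = {}
--
--     for photo, result in zip(photo_metadata, detection_results):
--         date = photo.get('date_taken', '')
--         phase = result.get('progress_indicators', {}).get('construction_phase', 'unknown')
--
--         if date not in phases_over_time:
--             phases_over_time[date] = {}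
--
--         if phase not in phases_over_time[date]:
--             phases_over_time[date][phase] = 0
--         phases_over_time[date][phase] += 1
--
--     return phases_over_time
-- ===== SOURCE B (Python) =====
-- def _analyze_phases_timeline(photo_metadata, detection_results):
--     """Declarative group-by: dedup the dates, then for each date dedup its
--     phase list and look every count up with list.count — no incremental
--     counting or nested dict updates."""
--     pairs = [(photo.get('date_taken', ''),
--               result.get('progress_indicators', {}).get('construction_phase', 'unknown'))
--              for photo, result in zip(photo_metadata, detection_results)]
--     dates = list(dict.fromkeys(d for d, _ in pairs))
--     result = {}
--     for d in dates:
--         phases = [ph for dd, ph in pairs if dd == d]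
--         result[d] = {ph: phases.count(ph) for ph in dict.fromkeys(phases)}
--     return result
-- ===== Notes on version B (the rewrite author's own statement) =====
-- stated objective: alternative
-- what changed: Replaces A's single incremental nested-dict-update loop by a declarative group-by: ordered dedup of the dates, then for each date a filtered phase list whose counts are read off with list.count over deduped phases; counting is done by scanning, not by maintaining counters.
import Mathlib
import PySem

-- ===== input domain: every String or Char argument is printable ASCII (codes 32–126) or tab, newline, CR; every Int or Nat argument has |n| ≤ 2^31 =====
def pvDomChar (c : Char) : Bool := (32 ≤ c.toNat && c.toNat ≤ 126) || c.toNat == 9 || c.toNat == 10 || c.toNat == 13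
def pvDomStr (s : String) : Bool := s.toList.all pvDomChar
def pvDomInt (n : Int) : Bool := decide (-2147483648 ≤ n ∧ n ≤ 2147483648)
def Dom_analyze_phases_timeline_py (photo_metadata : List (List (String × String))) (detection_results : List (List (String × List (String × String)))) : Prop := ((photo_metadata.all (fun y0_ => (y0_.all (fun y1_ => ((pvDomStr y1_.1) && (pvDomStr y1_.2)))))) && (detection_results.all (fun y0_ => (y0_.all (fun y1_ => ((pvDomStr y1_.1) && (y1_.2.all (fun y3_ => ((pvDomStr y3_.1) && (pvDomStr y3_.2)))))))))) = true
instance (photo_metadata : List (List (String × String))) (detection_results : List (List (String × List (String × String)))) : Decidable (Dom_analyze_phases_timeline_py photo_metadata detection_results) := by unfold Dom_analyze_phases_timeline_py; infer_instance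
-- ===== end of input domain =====

-- B replaces A's incremental nested-dict-update loop by a declarative group-by: deduped dates, per-date filtered phase lists, counts read off with list.count; same result, different algorithm.


-- ===== PORT A =====
-- shared with port B: the two Python expressions computing date and phase for one (photo, result) pair
def pvExtract (pr : (List (String × String)) × (List (String × List (String × String)))) : String × String :=
  ((PySem.Dict.ofList pr.1).getD "date_taken" "",
   (PySem.Dict.ofList (((PySem.Dict.ofList pr.2).get? "progress_indicators").getD [])).getD "construction_phase" "unknown")

-- A's loop body: nested incremental update (create date entry, create phase entry at 0, += 1)
def pvAStep (n : PySem.Dict String (PySem.Dict String Int)) (p : String × String) :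
    PySem.Dict String (PySem.Dict String Int) :=
  let n1 := if n.contains p.1 then n else n.insert p.1 PySem.Dict.empty
  let inner := n1.getD p.1 PySem.Dict.empty
  let inner1 := if inner.contains p.2 then inner else inner.insert p.2 0
  n1.insert p.1 (inner1.insert p.2 (inner1.getD p.2 0 + 1))

def analyze_phases_timeline_py (photo_metadata : List (List (String × String))) (detection_results : List (List (String × List (String × String)))) : List (String × List (String × Int)) :=
  (((photo_metadata.zip detection_results).foldl
      (fun n pr => pvAStep n (pvExtract pr)) PySem.Dict.empty).items).map
    (fun kv => (kv.1, kv.2.items))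

-- ===== PORT B =====
-- B: deduped dates; per date, the filtered phase list; counts read off with list.count over deduped phases
def analyze_phases_timeline_py_alt (photo_metadata : List (List (String × String))) (detection_results : List (List (String × List (String × String)))) : List (String × List (String × Int)) :=
  let pairs := (photo_metadata.zip detection_results).map pvExtract
  (PySem.List.dedup (pairs.map (·.1))).map (fun d =>
    let phases := (pairs.filter (fun p => p.1 == d)).map (·.2)
    (d, (PySem.List.dedup phases).map (fun ph => (ph, (phases.count ph : Int)))))

-- ===== PRECONDITION & SPEC =====
def Spec_analyze_phases_timeline_py (photo_metadata : List (List (String × String))) (detection_results : List (List (String × List (String × String)))) (out : List (String × List (String × Int))) : Prop := out = analyze_phases_timeline_py_alt photo_metadata detection_results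
instance (photo_metadata : List (List (String × String))) (detection_results : List (List (String × List (String × String)))) (out : List (String × List (String × Int))) : Decidable (Spec_analyze_phases_timeline_py photo_metadata detection_results out) := by unfold Spec_analyze_phases_timeline_py; infer_instance

-- ===== CLAIM (what is proved, stated in full; the proofs are below) =====
def Claim_equal_analyze_phases_timeline_py : Prop := ∀ (photo_metadata : List (List (String × String))) (detection_results : List (List (String × List (String × String)))), Dom_analyze_phases_timeline_py photo_metadata detection_results → Spec_analyze_phases_timeline_py photo_metadata detection_results (analyze_phases_timeline_py photo_metadata detection_results)

-- ===== LEMMAS AND PROOFS =====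

-- A's step in guard-free normal form: one outer insert of the inner counting step
theorem pvAStep_eq (n : PySem.Dict String (PySem.Dict String Int)) (p : String × String) :
    pvAStep n p =
      n.insert p.1 ((n.getD p.1 PySem.Dict.empty).insert p.2
        ((n.getD p.1 PySem.Dict.empty).getD p.2 0 + 1)) := by
  unfold pvAStep
  by_cases h : n.contains p.1 = true
  · simp only [h, if_true]
    by_cases h2 : (n.getD p.1 PySem.Dict.empty).contains p.2 = true
    · simp [h2]
    · simp only [Bool.not_eq_true] at h2
      simp [h2, PySem.Dict.insert_insert_self, PySem.Dict.getD_insert_self,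
        PySem.Dict.getD_of_not_contains _ _ h2]
  · simp only [Bool.not_eq_true] at h
    rw [if_neg (by simp [h]), PySem.Dict.getD_of_not_contains _ _ h]
    simp [PySem.Dict.insert_insert_self, PySem.Dict.getD_insert_self,
      PySem.Dict.contains_empty, PySem.Dict.getD_empty]

-- the lookup of one date in A's fold is the inner counting fold over that date's phases
theorem pvGetD_fold (pairs : List (String × String)) (d : String) :
    ∀ n : PySem.Dict String (PySem.Dict String Int),
      (pairs.foldl pvAStep n).getD d PySem.Dict.empty
        = ((pairs.filter (fun p => p.1 == d)).map (·.2)).foldl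
            (fun i ph => i.insert ph (i.getD ph 0 + 1)) (n.getD d PySem.Dict.empty) := by
  induction pairs with
  | nil => intro n; rfl
  | cons p l ih =>
    intro n
    simp only [List.foldl_cons, List.filter_cons]
    by_cases hd : p.1 = d
    · rw [if_pos (by simp [hd])]
      simp only [List.map_cons, List.foldl_cons]
      rw [ih, pvAStep_eq, PySem.Dict.getD_insert, if_pos hd.symm, hd]
    · rw [if_neg (by simp [hd])]
      rw [ih, pvAStep_eq, PySem.Dict.getD_insert, if_neg (fun h => hd h.symm)]

-- the keys of A's fold are the deduped dates, in first-seen order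
theorem pvKeys_fold (pairs : List (String × String)) :
    (pairs.foldl pvAStep PySem.Dict.empty).keys = PySem.List.dedup (pairs.map (·.1)) := by
  have h : pairs.foldl pvAStep PySem.Dict.empty
      = pairs.foldl (fun n p => n.insert p.1
          ((n.getD p.1 PySem.Dict.empty).insert p.2
            ((n.getD p.1 PySem.Dict.empty).getD p.2 0 + 1))) PySem.Dict.empty := by
    exact PySem.List.foldl_congr_mem _ _ _ _ (fun n p _ => pvAStep_eq n p)
  rw [h, PySem.Dict.keys_foldl_insert_key, PySem.List.dedup_eq_ofList]
  simp [PySem.Dict.keys_empty, PySem.Set.update_nil_left]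

theorem pvKeys_nodup (pairs : List (String × String)) :
    (pairs.foldl pvAStep PySem.Dict.empty).keys.Nodup := by
  rw [pvKeys_fold]; exact PySem.List.nodup_dedup _

-- the heart: A's fold, rendered as items, is B's group-by expression
theorem pvMain (pairs : List (String × String)) :
    ((pairs.foldl pvAStep PySem.Dict.empty).items).map (fun kv => (kv.1, kv.2.items))
      = (PySem.List.dedup (pairs.map (·.1))).map (fun d =>
          let phases := (pairs.filter (fun p => p.1 == d)).map (·.2)
          (d, (PySem.List.dedup phases).map (fun ph => (ph, (phases.count ph : Int))))) := by
  rw [PySem.Dict.items_eq_map_keys _ (pvKeys_nodup pairs) PySem.Dict.empty, pvKeys_fold]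
  rw [List.map_map]
  apply List.map_congr_left
  intro d _
  simp only [Function.comp]
  rw [pvGetD_fold pairs d PySem.Dict.empty]
  rw [PySem.Dict.getD_empty, PySem.Dict.foldl_insert_getD_add_one_eq_counter,
    PySem.Dict.items_counter, PySem.List.dedup_eq_ofList]

-- ===== VERDICT (by name: the statement is the Claim_ definition above) =====
theorem analyze_phases_timeline_py_spec : Claim_equal_analyze_phases_timeline_py := by
  intro pm dr _
  unfold Spec_analyze_phases_timeline_py analyze_phases_timeline_py analyze_phases_timeline_py_alt
  rw [← List.foldl_map, pvMain]
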